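-- pv_equiv track=rewrite | github.com/atinjin/study | algorithm/fraudulent_activity/fraudulent_activity.py | find_median_odd
-- ===== SOURCE A (Python) =====
-- def find_median_odd(count_arr, d):
--     median = None
--     first = int(d / 2) + 1
--     count = 0
--     for i in range(len(count_arr)):
--         if count_arr[i] > 0:
--             count += count_arr[i]
--         if count >= first:
--             median = i
--             break
--     return median
-- ===== SOURCE B (Python) =====
-- def _bisect_left(a, x):
--     lo, hi = 0, len(a)
--     while lo < hi:
--         mid = (lo + hi) // 2
--         if a[mid] < x:
--             lo = mid + 1
--         else:
--             hi = mid
--     return lo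
--
--
-- def find_median_odd(count_arr, d):
--     first = int(d / 2) + 1
--     cdf = []
--     total = 0
--     for c in count_arr:
--         if c > 0:
--             total += c
--         cdf.append(total)
--     i = _bisect_left(cdf, first)
--     return None if i == len(cdf) else i
-- ===== Notes on version B (the rewrite author's own statement) =====
-- stated objective: alternative
-- what changed: Replaces A's fused accumulate-and-early-exit scan with building a clamped prefix-sum table and locating the threshold index by a bisect_left-style binary search.
import Mathlib
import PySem

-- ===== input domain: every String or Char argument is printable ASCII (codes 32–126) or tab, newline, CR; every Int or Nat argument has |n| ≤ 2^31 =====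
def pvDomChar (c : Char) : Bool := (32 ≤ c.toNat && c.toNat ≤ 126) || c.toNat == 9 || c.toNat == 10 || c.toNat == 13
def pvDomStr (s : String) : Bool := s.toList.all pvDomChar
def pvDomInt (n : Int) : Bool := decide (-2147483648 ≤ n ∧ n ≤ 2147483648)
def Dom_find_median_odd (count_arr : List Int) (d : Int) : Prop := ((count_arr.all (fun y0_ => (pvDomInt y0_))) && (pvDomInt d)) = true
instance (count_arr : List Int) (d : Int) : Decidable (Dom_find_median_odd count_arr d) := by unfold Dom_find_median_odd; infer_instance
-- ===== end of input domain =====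

-- B replaces A's fused accumulate-and-early-exit scan by a prefix-sum table followed by a
-- bisect_left binary search (objective: alternative decomposition, same overall cost).

-- ===== PORT A =====
-- Python's int(d / 2): exact true division of an int by 2 (|d| ≤ 2^31, so the float is exact),
-- truncated toward zero.  Lean's Int `/` floors for positive divisor, so truncate explicitly.
def pyHalfTrunc (d : Int) : Int := if 0 ≤ d then d / 2 else -((-d) / 2)

-- the for-loop of A: walk the array accumulating positive entries, early-exit at `count ≥ first`
def goA : List Int → Int → Int → Int → Option Int
  | [], _, _, _ => none
  | c :: rest, first, count, i =>
    let count' := if c > 0 then count + c else count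
    if count' ≥ first then some i else goA rest first count' (i + 1)

def find_median_odd (count_arr : List Int) (d : Int) : Option Int :=
  goA count_arr (pyHalfTrunc d + 1) 0 0

-- ===== PORT B =====
-- the cdf-building loop of Source B
def buildCdf : List Int → Int → List Int
  | [], _ => []
  | c :: rest, total =>
    let t := if c > 0 then total + c else total
    t :: buildCdf rest t

-- Source B's hand-written _bisect_left (while lo < hi binary search)
def bisectLeft (a : List Int) (x : Int) (lo hi : Nat) : Nat :=
  if _h : lo < hi then
    let mid := (lo + hi) / 2
    if a.getD mid 0 < x then bisectLeft a x (mid + 1) hi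
    else bisectLeft a x lo mid
  else lo
termination_by hi - lo

def find_median_odd_alt (count_arr : List Int) (d : Int) : Option Int :=
  let first := pyHalfTrunc d + 1
  let cdf := buildCdf count_arr 0
  let i := bisectLeft cdf first 0 cdf.length
  if i = cdf.length then none else some (i : Int)

-- ===== PRECONDITION & SPEC =====
def Spec_find_median_odd (count_arr : List Int) (d : Int) (out : Option Int) : Prop := out = find_median_odd_alt count_arr d
instance (count_arr : List Int) (d : Int) (out : Option Int) : Decidable (Spec_find_median_odd count_arr d out) := by unfold Spec_find_median_odd; infer_instance

-- ===== CLAIM (what is proved, stated in full; the proofs are below) =====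
def Claim_equal_find_median_odd : Prop := ∀ (count_arr : List Int) (d : Int), Dom_find_median_odd count_arr d → Spec_find_median_odd count_arr d (find_median_odd count_arr d)

-- ===== LEMMAS AND PROOFS =====

-- first index of a whose value is ≥ x (a.length if none): the common reference point
def firstGE : List Int → Int → Nat
  | [], _ => 0
  | v :: rest, x => if x ≤ v then 0 else 1 + firstGE rest x

theorem firstGE_le_length (a : List Int) (x : Int) : firstGE a x ≤ a.length := by
  induction a with
  | nil => simp [firstGE]
  | cons v rest ih =>
    simp only [firstGE, List.length_cons]
    split <;> omega

theorem firstGE_lt (a : List Int) (x : Int) : ∀ j, j < firstGE a x → a.getD j 0 < x := by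
  induction a with
  | nil => simp [firstGE]
  | cons v rest ih =>
    intro j hj
    simp only [firstGE] at hj
    by_cases h : x ≤ v
    · simp [h] at hj
    · simp only [if_neg h] at hj
      cases j with
      | zero => simpa using by omega
      | succ j' => simpa using ih j' (by omega)

theorem firstGE_self (a : List Int) (x : Int) (h : firstGE a x < a.length) :
    x ≤ a.getD (firstGE a x) 0 := by
  induction a with
  | nil => simp [firstGE] at h
  | cons v rest ih =>
    simp only [firstGE] at h ⊢
    by_cases hx : x ≤ v
    · simpa [hx]
    · simp only [if_neg hx, List.length_cons] at h ⊢
      have := ih (by omega)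
      simpa [Nat.add_comm 1 (firstGE rest x)] using this

-- every element of buildCdf xs t is ≥ t
theorem buildCdf_ge (xs : List Int) (t : Int) : ∀ v ∈ buildCdf xs t, t ≤ v := by
  induction xs generalizing t with
  | nil => simp [buildCdf]
  | cons c rest ih =>
    intro v hv
    simp only [buildCdf, List.mem_cons] at hv
    rcases hv with h | h
    · subst h; split <;> omega
    · have h1 := ih (if c > 0 then t + c else t) v h
      split at h1 <;> omega

theorem buildCdf_pairwise (xs : List Int) (t : Int) :
    (buildCdf xs t).Pairwise (· ≤ ·) := by
  induction xs generalizing t with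
  | nil => simp [buildCdf]
  | cons c rest ih =>
    simp only [buildCdf, List.pairwise_cons]
    exact ⟨fun v hv => buildCdf_ge rest _ v hv, ih _⟩

theorem length_buildCdf (xs : List Int) (t : Int) : (buildCdf xs t).length = xs.length := by
  induction xs generalizing t with
  | nil => rfl
  | cons c rest ih => simp [buildCdf, ih]

-- monotonicity of cdf on indices, via Pairwise
theorem cdf_mono (xs : List Int) (t : Int) :
    ∀ j k, j ≤ k → k < (buildCdf xs t).length →
      (buildCdf xs t).getD j 0 ≤ (buildCdf xs t).getD k 0 := by
  intro j k hjk hk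
  rcases Nat.lt_or_ge j k with h | h
  · have hp := (List.pairwise_iff_getElem).1 (buildCdf_pairwise xs t) j k (by omega) hk h
    rw [List.getD_eq_getElem _ _ (by omega), List.getD_eq_getElem _ _ hk]
    exact hp
  · have : j = k := by omega
    subst this; exact le_refl _

-- binary search correctness: given the bracketing facts about F, bisectLeft returns F
theorem bisectLeft_eq (a : List Int) (x : Int) (F : Nat)
    (hlt : ∀ j, j < F → a.getD j 0 < x)
    (hge : ∀ j, F ≤ j → j < a.length → x ≤ a.getD j 0) :
    ∀ n lo hi, hi - lo ≤ n → lo ≤ F → F ≤ hi → hi ≤ a.length →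
      bisectLeft a x lo hi = F := by
  intro n
  induction n with
  | zero =>
    intro lo hi h1 h2 h3 h4
    rw [bisectLeft]
    have : ¬ lo < hi := by omega
    simp only [dif_neg this]
    omega
  | succ n ih =>
    intro lo hi h1 h2 h3 h4
    rw [bisectLeft]
    by_cases hlh : lo < hi
    · simp only [dif_pos hlh]
      set mid := (lo + hi) / 2 with hmid
      have hmlo : lo ≤ mid := by omega
      have hmhi : mid < hi := by omega
      by_cases hc : a.getD mid 0 < x
      · simp only [if_pos hc]
        have hF : mid + 1 ≤ F := by
          by_contra hcon
          have : F ≤ mid := by omega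
          exact absurd (hge mid this (by omega)) (by omega)
        exact ih (mid + 1) hi (by omega) hF h3 h4
      · simp only [if_neg hc]
        have hF : F ≤ mid := by
          by_contra hcon
          exact hc (hlt mid (by omega))
        exact ih lo mid (by omega) h2 hF (by omega)
    · simp only [dif_neg hlh]; omega

-- A's loop returns the first index where the (clamped) running sum reaches `first`,
-- i.e. firstGE of the cdf, offset by the starting index
theorem goA_eq (xs : List Int) (first : Int) :
    ∀ t i, goA xs first t i =
      (if firstGE (buildCdf xs t) first = xs.length then none
       else some (i + (firstGE (buildCdf xs t) first : Int))) := by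
  induction xs with
  | nil => intro t i; simp [goA, buildCdf, firstGE]
  | cons c rest ih =>
    intro t i
    simp only [goA, buildCdf, firstGE, List.length_cons]
    set t' := if c > 0 then t + c else t with ht'
    by_cases h : first ≤ t'
    · have : t' ≥ first := h
      simp [this]
    · have hng : ¬ t' ≥ first := h
      simp only [if_neg hng, ih t' (i + 1)]
      have hle := firstGE_le_length (buildCdf rest t') first
      rw [length_buildCdf] at hle
      by_cases he : firstGE (buildCdf rest t') first = rest.length
      · simp [he, Nat.add_comm]
      · have h1 : ¬ (1 + firstGE (buildCdf rest t') first = rest.length + 1) := by omega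
        simp only [if_neg he, if_neg h1]
        congr 1
        push_cast
        omega

theorem main_eq (count_arr : List Int) (d : Int) :
    find_median_odd count_arr d = find_median_odd_alt count_arr d := by
  have hbl :
      bisectLeft (buildCdf count_arr 0) (pyHalfTrunc d + 1) 0 count_arr.length =
        firstGE (buildCdf count_arr 0) (pyHalfTrunc d + 1) := by
    rw [show count_arr.length = (buildCdf count_arr 0).length from (length_buildCdf _ _).symm]
    set first := pyHalfTrunc d + 1
    set cdf := buildCdf count_arr 0 with hc
    set F := firstGE cdf first with hF
    exact bisectLeft_eq cdf first F (firstGE_lt cdf first)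
      (fun j hFj hj => by
        calc first ≤ cdf.getD F 0 := firstGE_self cdf first (by omega)
          _ ≤ cdf.getD j 0 := cdf_mono count_arr 0 F j hFj hj)
      cdf.length 0 cdf.length (by omega) (by omega)
      (by rw [hF]; exact firstGE_le_length _ _) (le_refl _)
  simp only [find_median_odd, find_median_odd_alt, goA_eq, hbl, length_buildCdf]
  split <;> simp

-- ===== VERDICT (by name: the statement is the Claim_ definition above) =====
theorem find_median_odd_spec : Claim_equal_find_median_odd := by
  intro count_arr d _
  unfold Spec_find_median_odd
  exact main_eq count_arr d
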